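-- pv_equiv track=rewrite | github.com/dancdtr/gamevolt.magic-wand.tracking | gamevolt/iterables/iter_tools.py | drop_last
-- ===== SOURCE A (Python) =====
-- from collections import deque
-- from collections.abc import Iterable, Iterator, Sequence
-- from typing import TypeVar
--
-- T = TypeVar("T")
--
-- def drop_last(it: Iterable[T], n: int) -> Iterator[T]:
--     if n <= 0:
--         yield from it
--         return
--     q: deque[T] = deque(maxlen=n)
--     for x in it:
--         if len(q) == q.maxlen:
--             yield q.popleft()
--         q.append(x)
-- ===== SOURCE B (Python) =====
-- def drop_last(it, n):
--     if n <= 0: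
--         yield from it
--         return
--     items = list(it)
--     yield from items[:-n]
-- ===== Notes on version B (the rewrite author's own statement) =====
-- stated objective: simpler
-- what changed: Replaces the bounded-deque late-emission streaming loop with full materialization of the input followed by a single negative-stop slice items[:-n], removing the per-element buffer bookkeeping.
import Mathlib
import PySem

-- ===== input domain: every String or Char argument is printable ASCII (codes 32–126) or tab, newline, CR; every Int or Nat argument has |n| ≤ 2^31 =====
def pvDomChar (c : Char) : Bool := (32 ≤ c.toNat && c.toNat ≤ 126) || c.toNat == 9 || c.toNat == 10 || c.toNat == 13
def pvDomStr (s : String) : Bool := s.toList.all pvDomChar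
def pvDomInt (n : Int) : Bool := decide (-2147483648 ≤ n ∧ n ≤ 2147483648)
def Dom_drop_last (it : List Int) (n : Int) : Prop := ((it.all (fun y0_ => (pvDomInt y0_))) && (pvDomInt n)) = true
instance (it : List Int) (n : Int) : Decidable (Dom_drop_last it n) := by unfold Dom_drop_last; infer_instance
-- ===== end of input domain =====

-- B replaces A's bounded-deque streaming loop with full materialization + one slice items[:-n] (simpler; same cost).


-- ===== PORT A =====
-- the 'for x in it' loop: q is the deque (maxlen n), out the yielded prefix;
-- 'q.popleft()' is q.take 1 / q.drop 1, 'q.append x' is q ++ [x]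
def dropLastLoopA (n : Nat) : List Int → List Int → List Int → List Int
  | [], _, out => out
  | x :: rest, q, out =>
    if q.length = n then dropLastLoopA n rest (q.drop 1 ++ [x]) (out ++ q.take 1)
    else dropLastLoopA n rest (q ++ [x]) out

def drop_last (it : List Int) (n : Int) : List Int :=
  if n ≤ 0 then it
  else dropLastLoopA n.toNat it [] []

-- ===== PORT B =====
def drop_last_alt (it : List Int) (n : Int) : List Int :=
  if n ≤ 0 then it
  else PySem.List.slice it none (some (-n))     -- items[:-n]

-- ===== PRECONDITION & SPEC =====
def Spec_drop_last (it : List Int) (n : Int) (out : List Int) : Prop := out = drop_last_alt it n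
instance (it : List Int) (n : Int) (out : List Int) : Decidable (Spec_drop_last it n out) := by unfold Spec_drop_last; infer_instance

-- ===== CLAIM (what is proved, stated in full; the proofs are below) =====
def Claim_equal_drop_last : Prop := ∀ (it : List Int) (n : Int), Dom_drop_last it n → Spec_drop_last it n (drop_last it n)

-- ===== LEMMAS AND PROOFS =====

-- loop invariant: with window q (|q| ≤ k, k ≥ 1) the loop emits everything but the last k of q ++ xs
theorem dropLastLoopA_inv (k : Nat) (hk : 1 ≤ k) :
    ∀ (xs q out : List Int), q.length ≤ k →
      dropLastLoopA k xs q out = out ++ (q ++ xs).take (q.length + xs.length - k) := by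
  intro xs
  induction xs with
  | nil =>
    intro q out hq
    simp [dropLastLoopA]
    omega
  | cons x rest ih =>
    intro q out hq
    by_cases h : q.length = k
    · have hqne : q ≠ [] := by intro h0; subst h0; simp at h; omega
      obtain ⟨a, t, rfl⟩ := List.exists_cons_of_ne_nil hqne
      have hk' : t.length + 1 = k := by simpa using h
      rw [dropLastLoopA, if_pos h, ih _ _ (by simp; omega)]
      have h1 : ((a :: t).drop 1 ++ [x]).length + rest.length - k = rest.length := by
        simp; omega
      have h2 : (a :: t).length + (x :: rest).length - k = rest.length + 1 := by
        simp; omega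
      rw [h1, h2]
      simp [List.take_succ_cons, List.append_assoc]
    · rw [dropLastLoopA, if_neg h, ih _ _ (by simp; omega)]
      simp
      omega

theorem drop_last_spec : Claim_equal_drop_last := by
  intro it n _
  unfold Spec_drop_last drop_last drop_last_alt
  by_cases h : n ≤ 0
  · simp [h]
  · rw [if_neg h, if_neg h]
    have hk : 1 ≤ n.toNat := by omega
    have hn : -n = -((n.toNat : Nat) : Int) := by omega
    rw [hn, PySem.List.slice_to_neg_natCast it n.toNat hk,
        dropLastLoopA_inv n.toNat hk it [] [] (by simp)]
    simp
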